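-- pv_equiv track=rewrite | github.com/marieai/marie-ai | marie/extract/engine/transform.py | java_to_python_date_format
-- ===== SOURCE A (Python) =====
-- def java_to_python_date_format(java_format: str) -> str:
--     """
--     Convert Java date format to Python strftime format with case-sensitive token mapping.
--     """
--     token_map = {
--         'yyyy': '%Y',
--         'yy': '%y',
--         'MM': '%m',  # Month
--         'dd': '%d',  # Day of month
--         'HH': '%H',  # Hour (24)
--         'hh': '%I',  # Hour (12)
--         'mm': '%M',  # Minute
--         'ss': '%S',  # Second
--         'a': '%p',  # AM/PM
--         'EEE': '%a',  # Weekday short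
--         'EEEE': '%A',  # Weekday full
--         'MMM': '%b',  # Month short
--         'MMMM': '%B',  # Month full
--         'D': '%j',  # Day of year
--         'z': '%Z',  # Time zone
--     }
--
--     i = 0
--     result = []
--
--     max_token_len = max(len(t) for t in token_map.keys())
--
--     while i < len(java_format):
--         matched = False
--         for token_len in range(max_token_len, 0, -1):
--             if i + token_len <= len(java_format):
--                 token = java_format[i : i + token_len]
--                 if token in token_map:
--                     result.append(token_map[token])
--                     i += token_len
--                     matched = True
--                     break
--         if not matched:
--             result.append(java_format[i])
--             i += 1
--
--     converted = ''.join(result)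
--     return converted
-- ===== SOURCE B (Python) =====
-- # B: run-length decomposition — every token in the map is a run of one repeated
-- # character, so group the input into maximal runs and emit tokens per run from a
-- # per-character table of (length, replacement) pairs sorted longest-first.
-- CHAR_TOKENS = {
--     'y': [(4, '%Y'), (2, '%y')],
--     'M': [(4, '%B'), (3, '%b'), (2, '%m')],
--     'E': [(4, '%A'), (3, '%a')],
--     'd': [(2, '%d')],
--     'H': [(2, '%H')],
--     'h': [(2, '%I')],
--     'm': [(2, '%M')],
--     's': [(2, '%S')],
--     'a': [(1, '%p')],
--     'D': [(1, '%j')],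
--     'z': [(1, '%Z')],
-- }
--
--
-- def java_to_python_date_format(java_format: str) -> str:
--     parts = []
--     i = 0
--     total = len(java_format)
--     while i < total:
--         ch = java_format[i]
--         j = i
--         while j < total and java_format[j] == ch:
--             j += 1
--         n = j - i
--         i = j
--         toks = CHAR_TOKENS.get(ch, [])
--         while n:
--             for length, rep in toks:
--                 if length <= n:
--                     parts.append(rep)
--                     n -= length
--                     break
--             else:
--                 parts.append(ch)
--                 n -= 1
--     return ''.join(parts)
-- ===== Notes on version B (the rewrite author's own statement) =====
-- stated objective: faster
-- what changed: A scans position by position trying window lengths 4..1 with slicing and dict lookups; B first run-length-groups the input into maximal runs of equal characters (every token in the map is a run of one repeated character) and emits replacements per run from a per-character table of (length, replacement) pairs sorted longest-first, removing the per-position window scan, the slicing and the dict hashing.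
import Mathlib
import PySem

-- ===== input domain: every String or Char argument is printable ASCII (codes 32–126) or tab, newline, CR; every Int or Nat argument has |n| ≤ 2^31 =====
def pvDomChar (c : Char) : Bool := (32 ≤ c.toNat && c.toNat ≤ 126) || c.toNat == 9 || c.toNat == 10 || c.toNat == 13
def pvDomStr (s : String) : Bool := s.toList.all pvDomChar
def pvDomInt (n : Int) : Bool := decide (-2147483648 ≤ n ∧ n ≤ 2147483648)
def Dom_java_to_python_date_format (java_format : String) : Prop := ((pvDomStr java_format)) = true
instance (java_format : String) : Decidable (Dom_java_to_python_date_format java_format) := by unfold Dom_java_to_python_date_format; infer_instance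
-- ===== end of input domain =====

-- B replaces A's per-position window-length scan against one dict by a run-length
-- decomposition: every token in the map is a run of one repeated character, so B groups
-- the input into maximal runs and emits replacements per run from a per-character table
-- (objective: faster by a constant factor, measured). Equivalence of
-- the return value is proved below.

-- ===== PORT A =====
-- The Java->strftime token table ('dict' as PySem.Dict; String keys/values carried as List Char,
-- the sanctioned representation of Python str).
def tokenMapA : PySem.Dict (List Char) (List Char) :=
  PySem.Dict.ofList [("yyyy".toList,"%Y".toList),("yy".toList,"%y".toList),("MM".toList,"%m".toList),("dd".toList,"%d".toList),("HH".toList,"%H".toList),("hh".toList,"%I".toList),("mm".toList,"%M".toList),("ss".toList,"%S".toList),("a".toList,"%p".toList),("EEE".toList,"%a".toList),("EEEE".toList,"%A".toList),("MMM".toList,"%b".toList),("MMMM".toList,"%B".toList),("D".toList,"%j".toList),("z".toList,"%Z".toList)]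

-- max(len(t) for t in token_map.keys())
def maxTokenLenA : Int :=
  (PySem.List.max? ((PySem.Dict.keys tokenMapA).map (fun t => (t.length : Int))) (fun x => x)).getD 0

-- A's inner 'for token_len in range(max_token_len, 0, -1)' loop, on the remaining suffix cs
-- (cs = java_format[i:], so 'i + token_len <= len(java_format)' is 'token_len <= len(cs)', and
-- the slice java_format[i : i + token_len] is cs.take token_len — in range by the guard).
def innerA (cs : List Char) : List Int → Option (List Char × Nat)
  | [] => none
  | l :: rest =>
    if l ≤ (cs.length : Int) then
      match PySem.Dict.get? tokenMapA (cs.take l.toNat) with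
      | some rep => some (rep, l.toNat)
      | none => innerA cs rest
    else innerA cs rest

-- Termination fact the while-loop port needs: a successful inner scan consumes ≥ 1 char.
theorem innerA_some {cs : List Char} {ls : List Int} {r : List Char} {k : Nat}
    (h : innerA cs ls = some (r, k)) : 1 ≤ k ∧ k ≤ cs.length := by
  induction ls with
  | nil => simp [innerA] at h
  | cons l rest ih =>
    rw [innerA] at h
    split at h
    · rename_i hle
      split at h
      · rename_i rep hget
        cases h
        refine ⟨?_, by omega⟩
        by_contra hk
        have hk0 : l.toNat = 0 := by omega
        rw [hk0, List.take_zero] at hget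
        rw [show PySem.Dict.get? tokenMapA [] = none from by decide] at hget
        cases hget
      · exact ih h
    · exact ih h

-- A's 'while i < len(java_format)' loop, i represented by the remaining suffix; collects the
-- appended pieces of 'result' in order.
def loopA : List Char → List (List Char)
  | [] => []
  | c :: rest =>
    match h : innerA (c :: rest) (PySem.List.pyRange maxTokenLenA 0 (-1)) with
    | some (rep, k) => rep :: loopA ((c :: rest).drop k)
    | none => [c] :: loopA rest
  termination_by cs => cs.length
  decreasing_by
  · have := innerA_some h
    simp only [List.length_drop, List.length_cons]
    omega
  · simp

def java_to_python_date_format (java_format : String) : String :=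
  String.ofList (PySem.Chars.join [] (loopA java_format.toList))   -- ''.join(result)

-- ===== PORT B =====
-- Source B's CHAR_TOKENS literal dict, looked up by CHAR_TOKENS.get(ch, []); ported as a direct
-- match on the character (a lookup in a compile-time-constant dict, exact for these keys).
def charToks : Char → List (Nat × List Char)
  | 'y' => [(4, ['%','Y']), (2, ['%','y'])]
  | 'M' => [(4, ['%','B']), (3, ['%','b']), (2, ['%','m'])]
  | 'E' => [(4, ['%','A']), (3, ['%','a'])]
  | 'd' => [(2, ['%','d'])]
  | 'H' => [(2, ['%','H'])]
  | 'h' => [(2, ['%','I'])]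
  | 'm' => [(2, ['%','M'])]
  | 's' => [(2, ['%','S'])]
  | 'a' => [(1, ['%','p'])]
  | 'D' => [(1, ['%','j'])]
  | 'z' => [(1, ['%','Z'])]
  | _ => []

-- Source B's inner 'while j < total and java_format[j] == ch: j += 1' counter, on the part of
-- the input after the run's first character: length of the leading run of c.
def countRun (c : Char) : List Char → Nat
  | [] => 0
  | d :: rest => if d = c then countRun c rest + 1 else 0

-- Source B's 'for length, rep in toks: if length <= n: … break' scan.
def pickB (n : Nat) : List (Nat × List Char) → Option (List Char × Nat)
  | [] => none
  | (l, rep) :: rest => if l ≤ n then some (rep, l) else pickB n rest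

theorem pickB_some {n : Nat} {ts : List (Nat × List Char)} {r : List Char} {l : Nat}
    (hpos : ∀ p ∈ ts, 1 ≤ p.1) (h : pickB n ts = some (r, l)) : 1 ≤ l ∧ l ≤ n := by
  induction ts with
  | nil => simp [pickB] at h
  | cons p rest ih =>
    obtain ⟨tl, trep⟩ := p
    rw [pickB] at h
    split at h
    · cases h; exact ⟨hpos _ (List.mem_cons_self ..), by omega⟩
    · exact ih (fun q hq => hpos q (List.mem_cons_of_mem _ hq)) h

-- Termination fact for B's inner while loop: every table entry has positive length.
theorem charToks_pos (c : Char) : ∀ p ∈ charToks c, 1 ≤ p.1 := by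
  unfold charToks
  split <;> (intro p hp) <;>
    simp only [List.mem_cons, List.not_mem_nil, or_false] at hp <;>
    first
      | exact hp.elim
      | (rcases hp with h|h|h <;> subst h <;> simp)
      | (rcases hp with h|h <;> subst h <;> simp)
      | (subst hp; simp)

-- Source B's inner 'while n:' loop over one maximal run of the character c of length n.
def emitRun (c : Char) : Nat → List (List Char)
  | 0 => []
  | n+1 =>
    match h : pickB (n+1) (charToks c) with
    | some (rep, l) => rep :: emitRun c (n + 1 - l)
    | none => [c] :: emitRun c n
  termination_by n => n
  decreasing_by
  · have := pickB_some (charToks_pos c) h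
    omega
  · simp

-- Source B's outer 'while i < total' loop: peel one maximal run at a time.
def loopB : List Char → List (List Char)
  | [] => []
  | c :: rest =>
    emitRun c (countRun c rest + 1) ++ loopB (rest.drop (countRun c rest))
  termination_by cs => cs.length
  decreasing_by
  · simp only [List.length_drop, List.length_cons]
    omega

def java_to_python_date_format_alt (java_format : String) : String :=
  String.ofList (PySem.Chars.join [] (loopB java_format.toList))   -- ''.join(parts)

-- ===== PRECONDITION & SPEC =====
def Spec_java_to_python_date_format (java_format : String) (out : String) : Prop := out = java_to_python_date_format_alt java_format
instance (java_format : String) (out : String) : Decidable (Spec_java_to_python_date_format java_format out) := by unfold Spec_java_to_python_date_format; infer_instance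

-- ===== CLAIM =====
def Claim_equal_java_to_python_date_format : Prop := ∀ (java_format : String), Dom_java_to_python_date_format java_format → Spec_java_to_python_date_format java_format (java_to_python_date_format java_format)

-- ===== LEMMAS AND PROOFS =====

-- (length, character) of the 15 dict keys: every key is a constant run of one character.
def keyShapes : List (Nat × Char) :=
  [(4,'y'),(2,'y'),(2,'M'),(2,'d'),(2,'H'),(2,'h'),(2,'m'),(2,'s'),(1,'a'),(3,'E'),(4,'E'),(3,'M'),(4,'M'),(1,'D'),(1,'z')]

theorem get?_none_master (xs : List Char)
    (h : ∀ p ∈ keyShapes, xs ≠ List.replicate p.1 p.2) :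
    PySem.Dict.get? tokenMapA xs = none := by
  have ne : ∀ (k : List Char) (n : Nat) (e : Char), k = List.replicate n e → (n, e) ∈ keyShapes → (k == xs) = false := by
    intro k n e hk hmem
    rw [beq_eq_false_iff_ne]
    intro hkx
    exact h (n, e) hmem (by rw [← hkx, hk])
  rw [show tokenMapA = PySem.Dict.mk [("yyyy".toList,"%Y".toList),("yy".toList,"%y".toList),("MM".toList,"%m".toList),("dd".toList,"%d".toList),("HH".toList,"%H".toList),("hh".toList,"%I".toList),("mm".toList,"%M".toList),("ss".toList,"%S".toList),("a".toList,"%p".toList),("EEE".toList,"%a".toList),("EEEE".toList,"%A".toList),("MMM".toList,"%b".toList),("MMMM".toList,"%B".toList),("D".toList,"%j".toList),("z".toList,"%Z".toList)] from by decide]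
  simp only [PySem.Dict.get?_mk_cons,
    ne ("yyyy".toList) 4 'y' (by decide) (by decide),
    ne ("yy".toList) 2 'y' (by decide) (by decide),
    ne ("MM".toList) 2 'M' (by decide) (by decide),
    ne ("dd".toList) 2 'd' (by decide) (by decide),
    ne ("HH".toList) 2 'H' (by decide) (by decide),
    ne ("hh".toList) 2 'h' (by decide) (by decide),
    ne ("mm".toList) 2 'm' (by decide) (by decide),
    ne ("ss".toList) 2 's' (by decide) (by decide),
    ne ("a".toList) 1 'a' (by decide) (by decide),
    ne ("EEE".toList) 3 'E' (by decide) (by decide),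
    ne ("EEEE".toList) 4 'E' (by decide) (by decide),
    ne ("MMM".toList) 3 'M' (by decide) (by decide),
    ne ("MMMM".toList) 4 'M' (by decide) (by decide),
    ne ("D".toList) 1 'D' (by decide) (by decide),
    ne ("z".toList) 1 'z' (by decide) (by decide),
    Bool.false_eq_true, if_false]
  simp [PySem.Dict.get?]

-- a list with two distinct members is not a constant run, hence not a key
theorem get?_none_of_two {xs : List Char} {c d : Char}
    (hc : c ∈ xs) (hd : d ∈ xs) (hne : c ≠ d) :
    PySem.Dict.get? tokenMapA xs = none := by
  have hk : ∀ p ∈ keyShapes, xs ≠ List.replicate p.1 p.2 := by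
    intro p _ hx
    exact hne ((List.eq_of_mem_replicate (hx ▸ hc)).trans (List.eq_of_mem_replicate (hx ▸ hd)).symm)
  exact get?_none_master xs hk

-- a run of a character whose token table is empty is not a key
theorem get?_none_replicate {c : Char} (hc : charToks c = []) (l : Nat) :
    PySem.Dict.get? tokenMapA (List.replicate l c) = none := by
  have hshape : ∀ p ∈ keyShapes, 1 ≤ p.1 ∧ charToks p.2 ≠ [] := by decide
  refine get?_none_master _ (fun p hp hx => ?_)
  obtain ⟨hp1, hp2⟩ := hshape p hp
  have hlen : l = p.1 := by
    have := congrArg List.length hx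
    simpa using this
  subst hlen
  have hhead : c = p.2 := by
    have h0 : p.1 ≠ 0 := by omega
    have := congrArg List.head? hx
    rw [List.head?_replicate, List.head?_replicate, if_neg h0, if_neg h0] at this
    exact Option.some.inj this
  exact hp2 (hhead ▸ hc)

def mapAt (c : Char) (l : Nat) : Option (List Char) :=
  PySem.Dict.get? tokenMapA (List.replicate l c)

-- A's inner scan, specialized to the head of a maximal run, phrased on run lookups only
def goG (c : Char) (j : Nat) : List Nat → Option (List Char × Nat)
  | [] => none
  | l :: ls =>
    if l ≤ j then
      match mapAt c l with
      | some r => some (r, l)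
      | none => goG c j ls
    else goG c j ls

theorem innerA_run (c : Char) (j : Nat) (hj : 1 ≤ j) (post : List Char)
    (hpost : ∀ d, post.head? = some d → d ≠ c) (ls : List Int)
    (hls : ∀ l ∈ ls, 1 ≤ l) :
    innerA (List.replicate j c ++ post) ls = goG c j (ls.map Int.toNat) := by
  induction ls with
  | nil => simp [innerA, goG]
  | cons l rest ih =>
    have hl := (hls l (List.mem_cons_self ..))
    have ihr := ih (fun x hx => hls x (List.mem_cons_of_mem _ hx))
    rw [innerA]
    simp only [List.map_cons]
    rw [goG]
    by_cases hlj : l.toNat ≤ j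
    · have hle : l ≤ ((List.replicate j c ++ post).length : Int) := by
        simp only [List.length_append, List.length_replicate]
        omega
      rw [if_pos hle, if_pos hlj]
      have htake : (List.replicate j c ++ post).take l.toNat = List.replicate l.toNat c := by
        rw [List.take_append_of_le_length (by simpa using hlj), List.take_replicate,
          Nat.min_eq_left hlj]
      rw [htake]
      show (match mapAt c l.toNat with
            | some rep => some (rep, l.toNat)
            | none => innerA (List.replicate j c ++ post) rest) = _
      cases hm : mapAt c l.toNat with
      | some r => simp
      | none => simpa using ihr
    · rw [if_neg hlj]
      by_cases hlen : l ≤ ((List.replicate j c ++ post).length : Int)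
      · rw [if_pos hlen]
        have hplen : 1 ≤ post.length := by
          simp only [List.length_append, List.length_replicate] at hlen
          omega
        obtain ⟨d, post', rfl⟩ : ∃ d post', post = d :: post' := by
          cases post with
          | nil => simp at hplen
          | cons d p => exact ⟨d, p, rfl⟩
        have hdc : d ≠ c := hpost d rfl
        have htake : (List.replicate j c ++ d :: post').take l.toNat
            = List.replicate j c ++ (d :: post').take (l.toNat - j) := by
          rw [List.take_append]
          congr 1
          · rw [List.take_replicate, Nat.min_eq_right (by omega)]
          · simp
        have hcmem : c ∈ (List.replicate j c ++ d :: post').take l.toNat := by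
          rw [htake]
          exact List.mem_append_left _ (List.mem_replicate.mpr ⟨by omega, rfl⟩)
        have hdmem : d ∈ (List.replicate j c ++ d :: post').take l.toNat := by
          rw [htake]
          refine List.mem_append_right _ ?_
          have : 1 ≤ l.toNat - j := by omega
          cases hk : l.toNat - j with
          | zero => omega
          | succ m => simp [List.take_succ_cons]
        rw [get?_none_of_two hcmem hdmem (Ne.symm hdc)]
        exact ihr
      · rw [if_neg hlen]
        exact ihr

set_option maxHeartbeats 2000000 in
theorem goG_eq_pickB (c : Char) (j : Nat) :
    goG c j [4,3,2,1] = pickB j (charToks c) := by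
  by_cases hy : c = 'y'
  · subst hy
    show goG 'y' j [4,3,2,1] = pickB j [(4, ['%','Y']), (2, ['%','y'])]
    simp only [goG, pickB,
      show mapAt 'y' 4 = some ['%','Y'] from by decide,
      show mapAt 'y' 3 = none from by decide,
      show mapAt 'y' 2 = some ['%','y'] from by decide,
      show mapAt 'y' 1 = none from by decide]
    split_ifs <;> rfl
  by_cases hM : c = 'M'
  · subst hM
    show goG 'M' j [4,3,2,1] = pickB j [(4, ['%','B']), (3, ['%','b']), (2, ['%','m'])]
    simp only [goG, pickB,
      show mapAt 'M' 4 = some ['%','B'] from by decide,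
      show mapAt 'M' 3 = some ['%','b'] from by decide,
      show mapAt 'M' 2 = some ['%','m'] from by decide,
      show mapAt 'M' 1 = none from by decide]
    split_ifs <;> rfl
  by_cases hE : c = 'E'
  · subst hE
    show goG 'E' j [4,3,2,1] = pickB j [(4, ['%','A']), (3, ['%','a'])]
    simp only [goG, pickB,
      show mapAt 'E' 4 = some ['%','A'] from by decide,
      show mapAt 'E' 3 = some ['%','a'] from by decide,
      show mapAt 'E' 2 = none from by decide,
      show mapAt 'E' 1 = none from by decide]
    split_ifs <;> rfl
  by_cases hd : c = 'd'
  · subst hd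
    show goG 'd' j [4,3,2,1] = pickB j [(2, ['%','d'])]
    simp only [goG, pickB,
      show mapAt 'd' 4 = none from by decide,
      show mapAt 'd' 3 = none from by decide,
      show mapAt 'd' 2 = some ['%','d'] from by decide,
      show mapAt 'd' 1 = none from by decide]
    split_ifs <;> rfl
  by_cases hH : c = 'H'
  · subst hH
    show goG 'H' j [4,3,2,1] = pickB j [(2, ['%','H'])]
    simp only [goG, pickB,
      show mapAt 'H' 4 = none from by decide,
      show mapAt 'H' 3 = none from by decide,
      show mapAt 'H' 2 = some ['%','H'] from by decide,
      show mapAt 'H' 1 = none from by decide]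
    split_ifs <;> rfl
  by_cases hh : c = 'h'
  · subst hh
    show goG 'h' j [4,3,2,1] = pickB j [(2, ['%','I'])]
    simp only [goG, pickB,
      show mapAt 'h' 4 = none from by decide,
      show mapAt 'h' 3 = none from by decide,
      show mapAt 'h' 2 = some ['%','I'] from by decide,
      show mapAt 'h' 1 = none from by decide]
    split_ifs <;> rfl
  by_cases hm : c = 'm'
  · subst hm
    show goG 'm' j [4,3,2,1] = pickB j [(2, ['%','M'])]
    simp only [goG, pickB,
      show mapAt 'm' 4 = none from by decide,
      show mapAt 'm' 3 = none from by decide,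
      show mapAt 'm' 2 = some ['%','M'] from by decide,
      show mapAt 'm' 1 = none from by decide]
    split_ifs <;> rfl
  by_cases hs : c = 's'
  · subst hs
    show goG 's' j [4,3,2,1] = pickB j [(2, ['%','S'])]
    simp only [goG, pickB,
      show mapAt 's' 4 = none from by decide,
      show mapAt 's' 3 = none from by decide,
      show mapAt 's' 2 = some ['%','S'] from by decide,
      show mapAt 's' 1 = none from by decide]
    split_ifs <;> rfl
  by_cases ha : c = 'a'
  · subst ha
    show goG 'a' j [4,3,2,1] = pickB j [(1, ['%','p'])]
    simp only [goG, pickB,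
      show mapAt 'a' 4 = none from by decide,
      show mapAt 'a' 3 = none from by decide,
      show mapAt 'a' 2 = none from by decide,
      show mapAt 'a' 1 = some ['%','p'] from by decide]
    split_ifs <;> rfl
  by_cases hD : c = 'D'
  · subst hD
    show goG 'D' j [4,3,2,1] = pickB j [(1, ['%','j'])]
    simp only [goG, pickB,
      show mapAt 'D' 4 = none from by decide,
      show mapAt 'D' 3 = none from by decide,
      show mapAt 'D' 2 = none from by decide,
      show mapAt 'D' 1 = some ['%','j'] from by decide]
    split_ifs <;> rfl
  by_cases hz : c = 'z'
  · subst hz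
    show goG 'z' j [4,3,2,1] = pickB j [(1, ['%','Z'])]
    simp only [goG, pickB,
      show mapAt 'z' 4 = none from by decide,
      show mapAt 'z' 3 = none from by decide,
      show mapAt 'z' 2 = none from by decide,
      show mapAt 'z' 1 = some ['%','Z'] from by decide]
    split_ifs <;> rfl
  have hct : charToks c = [] := by
    unfold charToks; split <;> simp_all
  have hm : ∀ l, mapAt c l = none := fun l => get?_none_replicate hct l
  simp [goG, pickB, hct, hm]

theorem loopA_run (c : Char) (post : List Char)
    (hpost : ∀ d, post.head? = some d → d ≠ c) :
    ∀ j, loopA (List.replicate j c ++ post) = emitRun c j ++ loopA post := by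
  intro j
  induction j using Nat.strong_induction_on with
  | _ j ih =>
    match j with
    | 0 => simp [emitRun]
    | k+1 =>
      have hstep : innerA (List.replicate (k+1) c ++ post) (PySem.List.pyRange maxTokenLenA 0 (-1)) = pickB (k+1) (charToks c) := by
        rw [show PySem.List.pyRange maxTokenLenA 0 (-1) = [4,3,2,1] from by decide]
        rw [innerA_run c (k+1) (by omega) post hpost [4,3,2,1] (by decide)]
        rw [show ([4,3,2,1] : List Int).map Int.toNat = ([4,3,2,1] : List Nat) from by decide]
        exact goG_eq_pickB c (k+1)
      rw [show List.replicate (k+1) c ++ post = c :: (List.replicate k c ++ post) from rfl] at hstep ⊢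
      rw [loopA, hstep]
      cases hp : pickB (k+1) (charToks c) with
      | none =>
        simp only []
        rw [emitRun, hp]
        simp only [List.cons_append]
        rw [ih k (by omega)]
      | some pl =>
        obtain ⟨rep, l⟩ := pl
        simp only []
        have hb := pickB_some (charToks_pos c) hp
        rw [emitRun, hp]
        simp only [List.cons_append]
        have hdrop : (c :: (List.replicate k c ++ post)).drop l = List.replicate (k+1-l) c ++ post := by
          rw [show c :: (List.replicate k c ++ post) = List.replicate (k+1) c ++ post from rfl]
          rw [List.drop_append_of_le_length (by simp; omega), List.drop_replicate]
        rw [hdrop, ih (k+1-l) (by omega)]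

theorem take_countRun (c : Char) (rest : List Char) :
    rest.take (countRun c rest) = List.replicate (countRun c rest) c := by
  induction rest with
  | nil => simp [countRun]
  | cons d rest ih =>
    rw [countRun]
    split
    · rename_i hd
      subst hd
      simp [List.replicate_succ, ih]
    · simp

theorem head_drop_countRun (c : Char) (rest : List Char) :
    ∀ d, (rest.drop (countRun c rest)).head? = some d → d ≠ c := by
  induction rest with
  | nil => intro d h; simp at h
  | cons e rest ih =>
    rw [countRun]
    split
    · rename_i he
      simpa using ih
    · rename_i he
      intro d h
      simp only [List.drop_zero, List.head?_cons, Option.some.injEq] at h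
      subst h
      exact he

theorem countRun_le (c : Char) (rest : List Char) : countRun c rest ≤ rest.length := by
  induction rest with
  | nil => simp [countRun]
  | cons d rest ih =>
    rw [countRun]
    split <;> simp <;> omega

theorem loop_eq (cs : List Char) : loopA cs = loopB cs := by
  induction hn : cs.length using Nat.strong_induction_on generalizing cs with
  | _ n ih =>
    match cs with
    | [] => simp [loopA, loopB]
    | c :: rest =>
      have hsplit : c :: rest = List.replicate (countRun c rest + 1) c ++ rest.drop (countRun c rest) := by
        conv_lhs => rw [← List.take_append_drop (countRun c rest) rest]
        rw [take_countRun]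
        rfl
      have hkle := countRun_le c rest
      calc loopA (c :: rest)
          = loopA (List.replicate (countRun c rest + 1) c ++ rest.drop (countRun c rest)) := by
            rw [← hsplit]
        _ = emitRun c (countRun c rest + 1) ++ loopA (rest.drop (countRun c rest)) :=
            loopA_run c _ (head_drop_countRun c rest) _
        _ = emitRun c (countRun c rest + 1) ++ loopB (rest.drop (countRun c rest)) := by
            rw [ih (rest.drop (countRun c rest)).length
              (by simp only [List.length_drop, List.length_cons] at hn ⊢; omega) _ rfl]
        _ = loopB (c :: rest) := by rw [loopB]

-- ===== VERDICT =====
theorem java_to_python_date_format_spec : Claim_equal_java_to_python_date_format := by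
  intro java_format _hdom
  unfold Spec_java_to_python_date_format java_to_python_date_format java_to_python_date_format_alt
  rw [loop_eq]
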